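-- pv_equiv track=rewrite | github.com/PavloKom/HomeTasks | hometask_11_2.py | generate_cube_numbers
-- ===== SOURCE A (Python) =====
-- def generate_cube_numbers(end):
--     num = 2
--     while True:
--         cube = num ** 3
--         if cube >= end:
--             break
--         yield cube
--         num += 1
-- ===== SOURCE B (Python) =====
-- def generate_cube_numbers(end):
--     # Exponential search for an upper bound hi with hi**3 >= end,
--     # then binary search for the largest lo with lo == 1 or lo**3 < end;
--     # finally yield the cubes 2**3 .. lo**3 from a precomputed range.
--     hi = 2
--     while hi ** 3 < end:
--         hi *= 2
--     lo = 1
--     while hi - lo > 1: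
--         m = (lo + hi) // 2
--         if m ** 3 < end:
--             lo = m
--         else:
--             hi = m
--     for n in range(2, lo + 1):
--         yield n ** 3
-- ===== Notes on version B (the rewrite author's own statement) =====
-- stated objective: alternative
-- what changed: B first computes the largest n with n**3 < end by exponential plus binary search and then yields the cubes over a precomputed finite range, replacing A's open-ended count-and-break loop.
import Mathlib
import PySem

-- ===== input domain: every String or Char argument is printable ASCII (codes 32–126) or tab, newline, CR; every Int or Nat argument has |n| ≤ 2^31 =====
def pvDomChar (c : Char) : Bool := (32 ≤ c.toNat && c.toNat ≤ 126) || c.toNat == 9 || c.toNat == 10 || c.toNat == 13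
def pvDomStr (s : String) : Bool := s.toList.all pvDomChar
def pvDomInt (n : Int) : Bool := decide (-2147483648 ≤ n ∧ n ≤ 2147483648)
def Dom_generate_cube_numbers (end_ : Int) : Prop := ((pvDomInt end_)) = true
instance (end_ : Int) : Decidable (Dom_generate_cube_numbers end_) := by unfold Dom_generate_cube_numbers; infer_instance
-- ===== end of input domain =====

-- B replaces A's open-ended count-and-break loop by an exponential+binary search for the
-- largest n with n^3 < end, followed by a map over the precomputed finite range (alternative decomposition).

-- ===== PORT A =====
-- A's while-loop with num starting at 2; ported with the counter i = num - 2 (a Nat) so the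
-- loop state is the same value num = i + 2 at every step.
theorem pv_self_le_cube (x : Int) (hx : 0 ≤ x) : x ≤ x ^ 3 := by
  nlinarith [mul_nonneg hx hx, sq_nonneg (x - 1)]

def pvLoopA (end_ : Int) (i : Nat) : List Int :=
  if _h : ((i : Int) + 2) ^ 3 ≥ end_ then []
  else ((i : Int) + 2) ^ 3 :: pvLoopA end_ (i + 1)
termination_by end_.toNat - i
decreasing_by
  have h2 := pv_self_le_cube ((i : Int) + 2) (by positivity)
  omega

def generate_cube_numbers (end_ : Int) : List Int := pvLoopA end_ 0

-- ===== PORT B =====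
-- exponential search: hi = h + 2 starts at 2 and doubles while hi^3 < end
def pvGrow (end_ : Int) (h : Nat) : Nat :=
  if _h : ((h : Int) + 2) ^ 3 < end_ then pvGrow end_ (2 * h + 2) else h + 2
termination_by end_.toNat - h
decreasing_by
  have h2 := pv_self_le_cube ((h : Int) + 2) (by positivity)
  omega

-- binary search: largest lo in [1, hi) with lo = 1 or lo^3 < end
def pvBs (end_ : Int) (lo hi : Nat) : Nat :=
  if _h : hi ≤ lo + 1 then lo
  else if ((((lo + hi) / 2 : Nat)) : Int) ^ 3 < end_ then pvBs end_ ((lo + hi) / 2) hi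
  else pvBs end_ lo ((lo + hi) / 2)
termination_by hi - lo
decreasing_by all_goals omega

def generate_cube_numbers_alt (end_ : Int) : List Int :=
  let hi := pvGrow end_ 0
  let lo := pvBs end_ 1 hi
  (List.range' 2 (lo - 1)).map (fun n : Nat => ((n : Int)) ^ 3)

-- ===== PRECONDITION & SPEC =====
def Spec_generate_cube_numbers (end_ : Int) (out : List Int) : Prop := out = generate_cube_numbers_alt end_
instance (end_ : Int) (out : List Int) : Decidable (Spec_generate_cube_numbers end_ out) := by unfold Spec_generate_cube_numbers; infer_instance

-- ===== CLAIM (what is proved, stated in full; the proofs are below) =====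
def Claim_equal_generate_cube_numbers : Prop := ∀ (end_ : Int), Dom_generate_cube_numbers end_ → Spec_generate_cube_numbers end_ (generate_cube_numbers end_)

-- ===== LEMMAS AND PROOFS =====

theorem pv_cube_mono {a b : Nat} (h : a ≤ b) : ((a : Int)) ^ 3 ≤ ((b : Int)) ^ 3 := by
  have hab : (a : Int) ≤ (b : Int) := by exact_mod_cast h
  gcongr

theorem pvGrow_spec (end_ : Int) (h : Nat) :
    2 ≤ pvGrow end_ h ∧ end_ ≤ ((pvGrow end_ h : Int)) ^ 3 := by
  induction h using pvGrow.induct end_ with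
  | case1 h hc ih => rw [pvGrow, dif_pos hc]; exact ih
  | case2 h hc =>
      rw [pvGrow, dif_neg hc]
      exact ⟨by omega, by simpa using le_of_not_gt hc⟩

theorem pvBs_spec (end_ : Int) (lo hi : Nat)
    (h1 : 1 ≤ lo) (h2 : lo < hi)
    (h3 : lo = 1 ∨ ((lo : Int)) ^ 3 < end_)
    (h4 : end_ ≤ ((hi : Int)) ^ 3) :
    1 ≤ pvBs end_ lo hi ∧ (pvBs end_ lo hi = 1 ∨ ((pvBs end_ lo hi : Int)) ^ 3 < end_) ∧
      end_ ≤ (((pvBs end_ lo hi : Int)) + 1) ^ 3 := by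
  induction lo, hi using pvBs.induct end_ with
  | case1 lo hi hc =>
      rw [pvBs, dif_pos hc]
      have hhi : hi = lo + 1 := by omega
      subst hhi
      refine ⟨h1, h3, ?_⟩
      simpa [add_assoc] using h4
  | case2 lo hi hc hm ih =>
      rw [pvBs, dif_neg hc, if_pos hm]
      exact ih (by omega) (by omega) (Or.inr hm) h4
  | case3 lo hi hc hm ih =>
      rw [pvBs, dif_neg hc, if_neg hm]
      exact ih h1 (by omega) h3 (by simpa using le_of_not_gt hm)

-- A's loop, characterized through any k with the binary-search postcondition
theorem pvLoopA_eq (end_ : Int) (k : Nat) (hk2 : k = 1 ∨ ((k : Int)) ^ 3 < end_)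
    (hk3 : end_ ≤ (((k : Int)) + 1) ^ 3) :
    ∀ i, pvLoopA end_ i = (List.range' (i + 2) (k - (i + 1))).map (fun n : Nat => ((n : Int)) ^ 3) := by
  intro i
  induction i using pvLoopA.induct end_ with
  | case1 i hc =>
      rw [pvLoopA, dif_pos hc]
      have hk : k ≤ i + 1 := by
        by_contra hlt
        have hik : i + 2 ≤ k := by omega
        have hk2' : ((k : Int)) ^ 3 < end_ := by
          rcases hk2 with h | h
          · omega
          · exact h
        have h5 := pv_cube_mono hik
        have : ((i : Int) + 2) ^ 3 ≤ ((k : Int)) ^ 3 := by push_cast at h5 ⊢; linarith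
        omega
      simp [Nat.sub_eq_zero_of_le hk]
  | case2 i hc ih =>
      rw [pvLoopA, dif_neg hc]
      have hc' : ((i : Int) + 2) ^ 3 < end_ := by omega
      have hik : i + 2 ≤ k := by
        by_contra hgt
        have hki : k + 1 ≤ i + 2 := by omega
        have h5 := pv_cube_mono hki
        have h' : (((k : Int)) + 1) ^ 3 ≤ ((i : Int) + 2) ^ 3 := by push_cast at h5 ⊢; linarith
        omega
      have hlen : k - (i + 1) = (k - (i + 2)) + 1 := by omega
      rw [hlen, List.range'_succ, List.map_cons, ih]
      push_cast
      ring_nf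

-- ===== VERDICT (by name: the statement is the Claim_ definition above) =====
theorem generate_cube_numbers_spec : Claim_equal_generate_cube_numbers := by
  intro end_ _
  unfold Spec_generate_cube_numbers generate_cube_numbers generate_cube_numbers_alt
  obtain ⟨hg1, hg2⟩ := pvGrow_spec end_ 0
  obtain ⟨hb1, hb2, hb3⟩ := pvBs_spec end_ 1 (pvGrow end_ 0) (by omega) (by omega)
    (Or.inl rfl) hg2
  have := pvLoopA_eq end_ (pvBs end_ 1 (pvGrow end_ 0)) hb2 hb3 0
  simpa using this
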